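-- pv_equiv track=rewrite | github.com/facebookresearch/LIGHT | projects/lightqa/data/generate_summaryqa.py | extract_persona_names
-- ===== SOURCE A (Python) =====
-- from typing import List, Tuple
--
-- def extract_persona_names(lines: List[str]) -> Tuple[str, str]:
--     def extract_name(name_token):
--         # Extract the names.
--         name_line = [l for l in lines if l.startswith(name_token)]
--         if not name_line:
--             return ""
--         name = name_line[0].replace(name_token, "").strip()
--         return name
--
--     self_name = extract_name("_self_name")
--     partner_name = extract_name("_partner_name")
--     return self_name, partner_name
-- ===== SOURCE B (Python) =====
-- from typing import List, Tuple
--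
-- def extract_persona_names(lines: List[str]) -> Tuple[str, str]:
--     self_line = None
--     partner_line = None
--     for l in lines:
--         if self_line is None and l.startswith("_self_name"):
--             self_line = l
--         if partner_line is None and l.startswith("_partner_name"):
--             partner_line = l
--         if self_line is not None and partner_line is not None:
--             break
--
--     def name(line, token):
--         return "" if line is None else line.replace(token, "").strip()
--
--     return name(self_line, "_self_name"), name(partner_line, "_partner_name")
-- ===== Notes on version B (the rewrite author's own statement) =====
-- stated objective: simpler
-- what changed: Replaces the two independent full scans (list comprehensions per token) with a single loop over lines that records the first self/partner matching line and stops early once both are found.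
import Mathlib
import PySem

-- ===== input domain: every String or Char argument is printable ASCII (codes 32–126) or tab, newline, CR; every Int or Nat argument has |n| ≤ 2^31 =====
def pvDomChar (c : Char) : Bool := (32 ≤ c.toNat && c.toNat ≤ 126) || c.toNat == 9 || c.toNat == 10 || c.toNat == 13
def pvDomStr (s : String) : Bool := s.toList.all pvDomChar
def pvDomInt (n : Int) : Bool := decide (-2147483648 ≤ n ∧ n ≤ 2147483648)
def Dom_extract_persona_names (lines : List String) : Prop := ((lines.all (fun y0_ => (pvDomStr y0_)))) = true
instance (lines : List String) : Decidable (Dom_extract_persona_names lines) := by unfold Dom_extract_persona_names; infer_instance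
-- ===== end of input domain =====

-- B merges A's two per-token full scans into one early-exiting loop that keeps the first self/partner matching line (simpler decomposition; return value only).


-- ===== PORT A =====
-- helper 'extract_name': filter lines by prefix, take the first, replace all token occurrences, strip
def pvAExtractName (lines : List String) (tok : String) : String :=
  let name_line := lines.filter (fun l => PySem.Str.startswith l tok)
  match name_line with
  | [] => ""
  | l :: _ => PySem.Str.strip (PySem.Str.replace l tok "")

def extract_persona_names (lines : List String) : String × String :=
  let self_name := pvAExtractName lines "_self_name"
  let partner_name := pvAExtractName lines "_partner_name"
  (self_name, partner_name)

-- ===== PORT B =====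
-- single loop: first matching line per token, early exit once both found
def pvBLoop : List String → Option String → Option String → Option String × Option String
  | [], s, p => (s, p)
  | l :: rest, s, p =>
    let s' := if s.isNone && PySem.Str.startswith l "_self_name" then some l else s
    let p' := if p.isNone && PySem.Str.startswith l "_partner_name" then some l else p
    if s'.isSome && p'.isSome then (s', p') else pvBLoop rest s' p'

def pvBName (line? : Option String) (tok : String) : String :=
  match line? with
  | none => ""
  | some l => PySem.Str.strip (PySem.Str.replace l tok "")

def extract_persona_names_alt (lines : List String) : String × String :=
  let r := pvBLoop lines none none
  (pvBName r.1 "_self_name", pvBName r.2 "_partner_name")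

-- ===== PRECONDITION & SPEC =====
def Spec_extract_persona_names (lines : List String) (out : String × String) : Prop := out = extract_persona_names_alt lines
instance (lines : List String) (out : String × String) : Decidable (Spec_extract_persona_names lines out) := by unfold Spec_extract_persona_names; infer_instance

-- ===== CLAIM (what is proved, stated in full; the proofs are below) =====
def Claim_equal_extract_persona_names : Prop := ∀ (lines : List String), Dom_extract_persona_names lines → Spec_extract_persona_names lines (extract_persona_names lines)

-- ===== LEMMAS AND PROOFS =====

-- the loop computes, per component, the initial value if present, else the first matching line
theorem pvBLoop_eq (lines : List String) : ∀ (s p : Option String),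
    pvBLoop lines s p =
      (s.orElse (fun _ => lines.find? (fun l => PySem.Str.startswith l "_self_name")),
       p.orElse (fun _ => lines.find? (fun l => PySem.Str.startswith l "_partner_name"))) := by
  induction lines with
  | nil => intro s p; cases s <;> cases p <;> rfl
  | cons l rest ih =>
    intro s p
    simp only [pvBLoop, List.find?]
    cases s <;> cases p <;>
      simp only [Option.isNone, Option.isSome, Bool.true_and, Bool.false_and, Option.orElse] <;>
      cases hs : PySem.Str.startswith l "_self_name" <;>
      cases hp : PySem.Str.startswith l "_partner_name" <;>
      simp [ih, Option.orElse]

theorem head?_filter_eq_find? (q : String → Bool) (lines : List String) :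
    (lines.filter q).head? = lines.find? q := by
  induction lines with
  | nil => rfl
  | cons l rest ih =>
    by_cases h : q l = true <;> simp [List.filter, List.find?, h, ih]

theorem pvAExtractName_eq (lines : List String) (tok : String) :
    pvAExtractName lines tok = pvBName (lines.find? (fun l => PySem.Str.startswith l tok)) tok := by
  unfold pvAExtractName pvBName
  rw [← head?_filter_eq_find?]
  cases lines.filter (fun l => PySem.Str.startswith l tok) <;> rfl

-- ===== VERDICT (by name: the statement is the Claim_ definition above) =====
theorem extract_persona_names_spec : Claim_equal_extract_persona_names := by
  intro lines _
  show _ = _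
  unfold extract_persona_names extract_persona_names_alt
  rw [pvBLoop_eq, pvAExtractName_eq, pvAExtractName_eq]
  rfl
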